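-- pv_equiv track=rewrite | github.com/tofolo17/MAC0110-files | MAC Multimídia/04.py | tem_repetido
-- ===== SOURCE A (Python) =====
-- def tem_repetido(A):
--   presentes = []
--   for linha in A:
--     for el in linha:
--       if el in presentes:
--         return True
--       presentes += [el]
--
--   return False
-- ===== SOURCE B (Python) =====
-- def tem_repetido(A):
--   todos = [el for linha in A for el in linha]
--   return len(set(todos)) != len(todos)
-- ===== Notes on version B (the rewrite author's own statement) =====
-- stated objective: idiomatic
-- what changed: Flattens the matrix once and compares the size of a set of all elements with the flattened length, instead of an incremental seen-list with a membership scan per element and early return.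
import Mathlib
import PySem

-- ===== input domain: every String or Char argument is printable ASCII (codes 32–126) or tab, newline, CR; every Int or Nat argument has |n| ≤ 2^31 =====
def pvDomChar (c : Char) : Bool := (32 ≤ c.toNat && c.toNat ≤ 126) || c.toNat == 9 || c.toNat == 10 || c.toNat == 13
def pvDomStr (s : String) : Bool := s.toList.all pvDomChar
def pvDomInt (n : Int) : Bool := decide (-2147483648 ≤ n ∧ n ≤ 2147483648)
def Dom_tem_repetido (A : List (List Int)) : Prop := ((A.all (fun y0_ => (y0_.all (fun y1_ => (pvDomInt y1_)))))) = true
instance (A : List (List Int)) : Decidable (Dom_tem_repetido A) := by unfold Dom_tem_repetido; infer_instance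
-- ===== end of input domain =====

-- B flattens the matrix once and detects duplicates by comparing set size with list length,
-- instead of A's incremental seen-list with a linear membership scan per element.


-- ===== PORT A =====
-- inner 'for el in linha': none = the 'return True' was taken, some seen' = updated presentes
def tr_inner : List Int → List Int → Option (List Int)
  | [], seen => some seen
  | el :: rest, seen => if el ∈ seen then none else tr_inner rest (seen ++ [el])

-- outer 'for linha in A'
def tr_rows : List (List Int) → List Int → Bool
  | [], _ => false
  | linha :: rest, seen =>
    match tr_inner linha seen with
    | none => true
    | some seen' => tr_rows rest seen'

def tem_repetido (A : List (List Int)) : Bool := tr_rows A []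

-- ===== PORT B =====
def tem_repetido_alt (A : List (List Int)) : Bool :=
  let todos := A.flatMap (fun linha => linha)
  decide ((PySem.Set.ofList todos).length ≠ todos.length)

-- ===== PRECONDITION & SPEC =====
def Spec_tem_repetido (A : List (List Int)) (out : Bool) : Prop := out = tem_repetido_alt A
instance (A : List (List Int)) (out : Bool) : Decidable (Spec_tem_repetido A out) := by unfold Spec_tem_repetido; infer_instance

-- ===== CLAIM (what is proved, stated in full; the proofs are below) =====
def Claim_equal_tem_repetido : Prop := ∀ (A : List (List Int)), Dom_tem_repetido A → Spec_tem_repetido A (tem_repetido A)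

-- ===== LEMMAS AND PROOFS =====

theorem tr_inner_char (l seen : List Int) (hs : seen.Nodup) :
    tr_inner l seen = if (seen ++ l).Nodup then some (seen ++ l) else none := by
  induction l generalizing seen with
  | nil => simp [tr_inner, hs]
  | cons el rest ih =>
    by_cases hmem : el ∈ seen
    · have : ¬ (seen ++ el :: rest).Nodup := by
        intro h
        exact (List.disjoint_of_nodup_append h) hmem (by simp)
      simp [tr_inner, hmem, this]
    · have hns : (seen ++ [el]).Nodup :=
        hs.append (List.nodup_singleton el) (List.disjoint_singleton.mpr hmem)
      have := ih (seen ++ [el]) hns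
      simp only [tr_inner, hmem, if_false, this, List.append_assoc, List.singleton_append]

theorem tr_rows_char (ls : List (List Int)) (seen : List Int) (hs : seen.Nodup) :
    tr_rows ls seen = !(seen ++ ls.flatMap (fun l => l)).Nodup := by
  induction ls generalizing seen with
  | nil => simp [tr_rows, hs]
  | cons l rest ih =>
    rw [tr_rows, tr_inner_char l seen hs]
    by_cases h : (seen ++ l).Nodup
    · rw [if_pos h]
      simpa [List.flatMap_cons, List.append_assoc] using ih (seen ++ l) h
    · rw [if_neg h]
      have hne : ¬ (seen ++ (l :: rest).flatMap (fun l => l)).Nodup := by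
        intro hw
        refine h (hw.sublist ?_)
        have hsub := List.sublist_append_left (seen ++ l) (rest.flatMap (fun l => l))
        simp only [List.flatMap_cons, List.append_assoc] at hsub ⊢
        exact hsub
      simpa using hne

theorem ofList_len_eq_iff (xs : List Int) :
    (PySem.Set.ofList xs).length = xs.length ↔ xs.Nodup := by
  induction xs using List.reverseRecOn with
  | nil => simp [PySem.Set.ofList]
  | append_singleton xs x ih =>
    have hstep : PySem.Set.ofList (xs ++ [x]) = PySem.Set.add (PySem.Set.ofList xs) x := by
      simp [PySem.Set.ofList_eq_foldl, List.foldl_append]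
    by_cases hmem : x ∈ xs
    · have hc : (PySem.Set.ofList xs).contains x := by
        simp [PySem.Set.mem_ofList, hmem]
      have hle := PySem.Set.length_ofList_le (xs := xs)
      constructor
      · intro hEq
        rw [hstep, PySem.Set.add, if_pos hc] at hEq
        simp only [List.length_append, List.length_singleton] at hEq
        omega
      · intro h
        rw [← List.concat_eq_append] at h
        exact absurd hmem ((List.nodup_concat xs x).mp h).1
    · have hc : ¬ (PySem.Set.ofList xs).contains x := by
        simp [PySem.Set.mem_ofList, hmem]
      rw [hstep, PySem.Set.add, if_neg hc, ← List.concat_eq_append,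
        ← List.concat_eq_append, List.nodup_concat]
      simp [hmem, ih]

-- ===== VERDICT (by name: the statement is the Claim_ definition above) =====
theorem tem_repetido_spec : Claim_equal_tem_repetido := by
  intro A _
  show tem_repetido A = tem_repetido_alt A
  rw [tem_repetido, tr_rows_char A [] List.nodup_nil]
  show (!decide ((([] : List Int) ++ A.flatMap (fun l => l)).Nodup))
      = decide ((PySem.Set.ofList (A.flatMap (fun l => l))).length ≠ (A.flatMap (fun l => l)).length)
  rw [List.nil_append]
  by_cases h : (A.flatMap (fun l => l)).Nodup
  · have he := (ofList_len_eq_iff (A.flatMap (fun l => l))).mpr h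
    rw [decide_eq_true h, decide_eq_false (fun hn => hn he)]
    rfl
  · have hne : (PySem.Set.ofList (A.flatMap (fun l => l))).length ≠ (A.flatMap (fun l => l)).length :=
      fun he => h ((ofList_len_eq_iff _).mp he)
    rw [decide_eq_false h, decide_eq_true hne]
    rfl
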